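-- pv_equiv track=rewrite | github.com/pypi-data/pypi-mirror-149 | packages/convert-string-to-number/convert_string_to_number-0.1.3-py3-none-any.whl/magic/magic.py | str2number
-- ===== SOURCE A (Python) =====
-- def str2number(source: str, size=99_999_999_999):
--     if not source or source is None:
--         raise ValueError("Thiếu thông tin đầu vào")
--
--     source_length = len(source)
--     delta = 1
--     total = 0
--
--     for i in range(source_length):
--         if i % 4 == 0:
--             delta = 1
--         else:
--             delta = delta * 256
--         total += ord(source[i]) * delta
--     return total % size
-- ===== SOURCE B (Python) =====
-- def str2number(source: str, size=99_999_999_999):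
--     if not source or source is None:
--         raise ValueError("Thiếu thông tin đầu vào")
--
--     total = 0
--     for start in range(0, len(source), 4):
--         chunk = source[start:start + 4]
--         chunk_value = 0
--         for offset in range(len(chunk)):
--             chunk_value += ord(chunk[offset]) * 256 ** offset
--         total += chunk_value
--     return total % size
-- ===== Notes on version B (the rewrite author's own statement) =====
-- stated objective: alternative
-- what changed: Replaces the flat loop with a stateful running delta (reset every 4th index) by a two-level traversal: an outer loop over 4-character chunks and an inner loop computing each chunk's little-endian base-256 value with weight 256**offset.
import Mathlib
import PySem

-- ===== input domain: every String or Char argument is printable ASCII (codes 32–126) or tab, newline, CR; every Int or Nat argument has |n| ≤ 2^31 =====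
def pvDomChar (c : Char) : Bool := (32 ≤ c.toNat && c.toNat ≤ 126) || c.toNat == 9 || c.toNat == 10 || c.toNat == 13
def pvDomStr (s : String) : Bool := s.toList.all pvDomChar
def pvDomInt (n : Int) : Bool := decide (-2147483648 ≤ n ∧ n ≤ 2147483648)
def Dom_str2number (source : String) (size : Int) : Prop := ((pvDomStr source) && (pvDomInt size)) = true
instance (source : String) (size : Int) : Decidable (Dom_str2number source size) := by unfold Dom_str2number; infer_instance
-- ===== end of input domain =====

-- B replaces A's flat loop with a stateful delta by an outer loop over 4-char chunks
-- and an inner loop using weight 256^offset (alternative decomposition, same cost).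
-- Both raise on empty source; '% size' raises for size = 0: Pre_ excludes exactly those.

-- ===== PORT A =====
-- A's for-loop: one step per character, carrying (i, delta, total).
def pvLoopA : List Char → Nat → Int → Int → Int
  | [], _, _, total => total
  | c :: rest, i, delta, total =>
      let d : Int := if i % 4 == 0 then 1 else delta * 256
      pvLoopA rest (i + 1) d (total + (c.toNat : Int) * d)

def str2number (source : String) (size : Int) : Int :=
  PySem.Int.mod (pvLoopA source.toList 0 1 0) size

-- ===== PORT B =====
-- inner loop: little-endian base-256 value of a chunk, weight 256^offset
def pvChunkVal : List Char → Nat → Int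
  | [], _ => 0
  | c :: rest, off => (c.toNat : Int) * 256 ^ off + pvChunkVal rest (off + 1)

-- outer loop: step through the string 4 characters at a time
def pvChunkSum : List Char → Int
  | [] => 0
  | c :: rest => pvChunkVal (List.take 4 (c :: rest)) 0 + pvChunkSum (List.drop 3 rest)
termination_by cs => cs.length
decreasing_by simp

def str2number_alt (source : String) (size : Int) : Int :=
  PySem.Int.mod (pvChunkSum source.toList) size

-- ===== PRECONDITION & SPEC =====
-- Pre_ excludes the empty string (both programs raise ValueError) and size = 0
-- (total % 0 raises ZeroDivisionError in both).
def Pre_str2number (source : String) (size : Int) : Prop := source ≠ "" ∧ size ≠ 0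
instance (source : String) (size : Int) : Decidable (Pre_str2number source size) := by
  unfold Pre_str2number; infer_instance
def pvWitness_str2number : String × Int := ("abc", 97)

def Spec_str2number (source : String) (size : Int) (out : Int) : Prop := out = str2number_alt source size
instance (source : String) (size : Int) (out : Int) : Decidable (Spec_str2number source size out) := by unfold Spec_str2number; infer_instance

-- ===== CLAIM (what is proved, stated in full; the proofs are below) =====
def Claim_equal_str2number : Prop := ∀ (source : String) (size : Int), Dom_str2number source size → Pre_str2number source size → Spec_str2number source size (str2number source size)

-- ===== LEMMAS AND PROOFS =====

theorem pvChunkSum_nil : pvChunkSum [] = 0 := by rw [pvChunkSum]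
theorem pvChunkSum_cons (c : Char) (rest : List Char) :
    pvChunkSum (c :: rest) = pvChunkVal (List.take 4 (c :: rest)) 0 + pvChunkSum (List.drop 3 rest) := by
  rw [pvChunkSum]

-- A's loop started at any index 4*k (delta about to be reset) computes total + pvChunkSum cs.
theorem pvLoopA_eq_chunkSum (n : Nat) :
    ∀ (cs : List Char), cs.length ≤ n → ∀ (k : Nat) (delta total : Int),
      pvLoopA cs (4 * k) delta total = total + pvChunkSum cs := by
  induction n with
  | zero =>
      intro cs h k delta total
      have : cs = [] := List.eq_nil_of_length_eq_zero (Nat.le_zero.mp h)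
      subst this; simp [pvLoopA, pvChunkSum_nil]
  | succ n ih =>
      intro cs h k delta total
      match cs with
      | [] => simp [pvLoopA, pvChunkSum_nil]
      | [a] =>
          simp [pvLoopA, pvChunkSum_cons, pvChunkSum_nil, pvChunkVal, Nat.mul_mod_right]
      | [a, b] =>
          have h1 : (4 * k + 1) % 4 = 1 := by omega
          simp [pvLoopA, pvChunkSum_cons, pvChunkSum_nil, pvChunkVal, Nat.mul_mod_right, h1]
          ring
      | [a, b, c] =>
          have h1 : (4 * k + 1) % 4 = 1 := by omega
          have h2 : (4 * k + 1 + 1) % 4 = 2 := by omega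
          simp [pvLoopA, pvChunkSum_cons, pvChunkSum_nil, pvChunkVal, Nat.mul_mod_right, h1, h2]
          ring
      | a :: b :: c :: d :: rest =>
          have h1 : (4 * k + 1) % 4 = 1 := by omega
          have h2 : (4 * k + 1 + 1) % 4 = 2 := by omega
          have h3 : (4 * k + 1 + 1 + 1) % 4 = 3 := by omega
          have h4 : 4 * k + 1 + 1 + 1 + 1 = 4 * (k + 1) := by omega
          have hr : rest.length ≤ n := by simp at h; omega
          simp only [pvLoopA, Nat.mul_mod_right, h1, h2, h3]
          rw [h4, ih rest hr (k + 1)]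
          rw [pvChunkSum_cons]
          simp [pvChunkVal]
          ring

-- ===== VERDICT (by name: the statement is the Claim_ definition above) =====
theorem str2number_spec : Claim_equal_str2number := by
  intro source size _ _
  unfold Spec_str2number str2number str2number_alt
  have := pvLoopA_eq_chunkSum source.toList.length source.toList le_rfl 0 1 0
  simp at this
  rw [this]
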